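-- pv_equiv track=rewrite | github.com/AiwonA1/FractiVerse-1.0 | core/pattern_emergence.py | _group_stable_points
-- ===== SOURCE A (Python) =====
-- def _group_stable_points(stable_points):
--     """Group consecutive stable points into regions"""
--     regions = []
--     current_region = []
--
--     for i, stable in enumerate(stable_points):
--         if stable:
--             current_region.append(i)
--         elif current_region:
--             if len(current_region) >= 5:  # Minimum region size
--                 regions.append(current_region)
--             current_region = []
--
--     if current_region and len(current_region) >= 5:
--         regions.append(current_region)
--
--     return regions
-- ===== SOURCE B (Python) =====
-- def _group_stable_points(stable_points):
--     """Group consecutive stable points into regions (streak-length DP + range reconstruction)."""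
--     n = len(stable_points)
--     streaks = [0] * n          # streaks[i] = length of the stable run ending at i
--     run = 0
--     for i, s in enumerate(stable_points):
--         run = run + 1 if s else 0
--         streaks[i] = run
--     # a region ends at i when its streak is long enough and the run stops there
--     return [list(range(i - streaks[i] + 1, i + 1))
--             for i in range(n)
--             if streaks[i] >= 5 and (i == n - 1 or not stable_points[i + 1])]
-- ===== Notes on version B (the rewrite author's own statement) =====
-- stated objective: alternative
-- what changed: B replaces A's accumulator loop (growing an index list per run, with a trailing-flush special case) by a two-stage dynamic-programming scheme: first compute for every position the length of the stable streak ending there, then emit list(range(...)) reconstructed from the streak length at each run end; no index list is ever accumulated during the scan.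
import Mathlib
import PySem

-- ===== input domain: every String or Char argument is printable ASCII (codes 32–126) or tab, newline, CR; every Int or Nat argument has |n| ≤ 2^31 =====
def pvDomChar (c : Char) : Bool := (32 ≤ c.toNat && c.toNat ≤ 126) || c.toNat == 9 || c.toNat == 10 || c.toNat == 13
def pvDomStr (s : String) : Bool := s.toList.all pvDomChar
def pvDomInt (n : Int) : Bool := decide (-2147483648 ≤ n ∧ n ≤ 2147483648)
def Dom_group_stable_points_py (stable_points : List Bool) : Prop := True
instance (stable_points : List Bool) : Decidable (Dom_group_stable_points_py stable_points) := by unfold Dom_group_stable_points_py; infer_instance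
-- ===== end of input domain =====

-- B replaces A's run-accumulator loop (with trailing flush) by a two-stage streak-length DP:
-- pass 1 computes the stable-streak length ending at each index, pass 2 emits ranges at run ends;
-- an alternative decomposition of the same cost.


-- ===== PORT A =====
-- A's for-loop over enumerate(stable_points) with state (regions, current_region),
-- written as the obvious structural recursion carrying the running index i.
def pvGoA (i : Int) (regions : List (List Int)) (cur : List Int) :
    List Bool → List (List Int)
  | [] => if cur ≠ [] ∧ cur.length ≥ 5 then regions ++ [cur] else regions
  | b :: rest =>
    if b then pvGoA (i + 1) regions (cur ++ [i]) rest
    else if cur ≠ [] then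
      pvGoA (i + 1) (if cur.length ≥ 5 then regions ++ [cur] else regions) [] rest
    else pvGoA (i + 1) regions cur rest

def group_stable_points_py (stable_points : List Bool) : List (List Int) :=
  pvGoA 0 [] [] stable_points

-- ===== PORT B =====
-- pass 1: streaks[i] = length of the stable run ending at i (the 'run' accumulator loop)
def pvStreaks (run : Nat) : List Bool → List Nat
  | [] => []
  | s :: rest =>
    let r := if s then run + 1 else 0
    r :: pvStreaks r rest

-- pass 2: the list comprehension over range(n) with its filter and range reconstruction
def group_stable_points_py_alt (stable_points : List Bool) : List (List Int) :=
  let n := stable_points.length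
  let streaks := pvStreaks 0 stable_points
  (List.range n).filterMap (fun i =>
    if streaks.getD i 0 ≥ 5 ∧ (i = n - 1 ∨ stable_points.getD (i + 1) true = false) then
      some (PySem.List.pyRange ((i : Int) - streaks.getD i 0 + 1) ((i : Int) + 1) 1)
    else none)

-- ===== PRECONDITION & SPEC =====
def Spec_group_stable_points_py (stable_points : List Bool) (out : List (List Int)) : Prop := out = group_stable_points_py_alt stable_points
instance (stable_points : List Bool) (out : List (List Int)) : Decidable (Spec_group_stable_points_py stable_points out) := by unfold Spec_group_stable_points_py; infer_instance

-- ===== CLAIM (what is proved, stated in full; the proofs are below) =====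
def Claim_equal_group_stable_points_py : Prop := ∀ (stable_points : List Bool), Dom_group_stable_points_py stable_points → Spec_group_stable_points_py stable_points (group_stable_points_py stable_points)

-- ===== LEMMAS AND PROOFS =====

-- reference: recursion carrying the absolute index i and the current streak length k
def pvSpecG (i : Int) (k : Nat) : List Bool → List (List Int)
  | [] => if k ≥ 5 then [PySem.List.pyRange (i - k) i 1] else []
  | true :: rest => pvSpecG (i + 1) (k + 1) rest
  | false :: rest =>
    (if k ≥ 5 then [PySem.List.pyRange (i - k) i 1] else []) ++ pvSpecG (i + 1) 0 rest

-- B's comprehension, generalized over the incoming streak k and the absolute offset i0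
def pvEmit (k : Nat) (i0 : Int) (sp : List Bool) : List (List Int) :=
  (List.range sp.length).filterMap (fun j =>
    if (pvStreaks k sp).getD j 0 ≥ 5 ∧ (j = sp.length - 1 ∨ sp.getD (j + 1) true = false) then
      some (PySem.List.pyRange (i0 + (j : Int) - (pvStreaks k sp).getD j 0 + 1) (i0 + (j : Int) + 1) 1)
    else none)

theorem pvEmit_zero (sp : List Bool) : group_stable_points_py_alt sp = pvEmit 0 0 sp := by
  simp [group_stable_points_py_alt, pvEmit]

theorem pvEmit_cons (k : Nat) (i0 : Int) (b : Bool) (rest : List Bool) :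
    pvEmit k i0 (b :: rest) =
      (if (if b then k + 1 else 0) ≥ 5 ∧ (rest = [] ∨ rest.getD 0 true = false) then
        [PySem.List.pyRange (i0 - (if b then k + 1 else 0) + 1) (i0 + 1) 1] else []) ++
      pvEmit (if b then k + 1 else 0) (i0 + 1) rest := by
  set r := if b then k + 1 else 0 with hr
  have hs : pvStreaks k (b :: rest) = r :: pvStreaks r rest := by simp [pvStreaks, hr]
  have htail :
      List.filterMap (fun j =>
        if (pvStreaks r rest).getD j 0 ≥ 5 ∧
            (j + 1 = rest.length ∨ rest.getD (j + 1) true = false) then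
          some (PySem.List.pyRange (i0 + ((j : Int) + 1) - (pvStreaks r rest).getD j 0 + 1)
            (i0 + ((j : Int) + 1) + 1) 1)
        else none) (List.range rest.length) = pvEmit r (i0 + 1) rest := by
    unfold pvEmit
    apply List.filterMap_congr
    intro j hj
    have hjlt : j < rest.length := List.mem_range.mp hj
    have hiff : (j + 1 = rest.length) ↔ (j = rest.length - 1) := by omega
    have h1 : i0 + ((j : Int) + 1) - (pvStreaks r rest).getD j 0 + 1
        = (i0 + 1) + (j : Int) - (pvStreaks r rest).getD j 0 + 1 := by ring
    have h2 : i0 + ((j : Int) + 1) + 1 = (i0 + 1) + (j : Int) + 1 := by ring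
    rw [h1, h2]
    simp only [hiff]
  rw [← htail]
  unfold pvEmit
  rw [hs]
  simp only [List.length_cons, List.range_succ_eq_map, List.filterMap_cons, List.filterMap_map,
    Function.comp_def, Nat.succ_eq_add_one, List.getD_cons_succ, List.getD_cons_zero,
    Nat.add_sub_cancel, Nat.cast_add, Nat.cast_one, Nat.cast_zero]
  have hcond : ((0 : Nat) = rest.length ∨ rest.getD 0 true = false) ↔
      (rest = [] ∨ rest.getD 0 true = false) := by
    cases rest <;> simp
  by_cases hC : r ≥ 5 ∧ (rest = [] ∨ rest.getD 0 true = false)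
  · rw [if_pos ⟨hC.1, hcond.mpr hC.2⟩, if_pos hC]
    simp
  · rw [if_neg (fun h => hC ⟨h.1, hcond.mp h.2⟩), if_neg hC]
    rfl

theorem pvEmit_cons_true (k : Nat) (i0 : Int) (rest : List Bool) :
    pvEmit k i0 (true :: rest) =
      (if k + 1 ≥ 5 ∧ (rest = [] ∨ rest.getD 0 true = false) then
        [PySem.List.pyRange (i0 - (k + 1 : Nat) + 1) (i0 + 1) 1] else []) ++
      pvEmit (k + 1) (i0 + 1) rest := by
  simpa using pvEmit_cons k i0 true rest

theorem pvEmit_cons_false (k : Nat) (i0 : Int) (rest : List Bool) :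
    pvEmit k i0 (false :: rest) = pvEmit 0 (i0 + 1) rest := by
  rw [pvEmit_cons]
  simp

-- the pending incoming run (ends strictly before sp's positions; emitted by pvSpecG, not by pvEmit)
def pvPend (k : Nat) (i0 : Int) (sp : List Bool) : List (List Int) :=
  if k ≥ 5 ∧ sp.headD false = false then [PySem.List.pyRange (i0 - k) i0 1] else []

theorem pvEmit_eq_specG (sp : List Bool) : ∀ (k : Nat) (i0 : Int),
    pvPend k i0 sp ++ pvEmit k i0 sp = pvSpecG i0 k sp := by
  induction sp with
  | nil =>
    intro k i0
    simp [pvPend, pvEmit, pvSpecG]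
  | cons b rest ih =>
    intro k i0
    cases b with
    | true =>
      rw [pvSpecG, ← ih (k + 1) (i0 + 1), pvEmit_cons_true]
      have hp : pvPend k i0 (true :: rest) = [] := by simp [pvPend]
      rw [hp, List.nil_append]
      congr 1
      unfold pvPend
      have hiff : (rest = [] ∨ rest.getD 0 true = false) ↔ rest.headD false = false := by
        cases rest <;> simp
      have harg : i0 - ((k + 1 : Nat) : Int) + 1 = i0 + 1 - ((k + 1 : Nat) : Int) := by
        push_cast; ring
      rw [harg]
      by_cases h : k + 1 ≥ 5 ∧ rest.headD false = false
      · rw [if_pos ⟨h.1, hiff.mpr h.2⟩, if_pos h]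
      · rw [if_neg (fun hh => h ⟨hh.1, hiff.mp hh.2⟩), if_neg h]
    | false =>
      rw [pvSpecG, pvEmit_cons_false, ← ih 0 (i0 + 1)]
      have hp0 : pvPend 0 (i0 + 1) rest = [] := by simp [pvPend]
      rw [hp0, List.nil_append]
      congr 1
      simp [pvPend]

-- A's loop equals the reference, with cur represented as the range ending at i
theorem pvGoA_eq (rest : List Bool) : ∀ (i : Int) (regions : List (List Int)) (k : Nat),
    pvGoA i regions (PySem.List.pyRange (i - k) i 1) rest = regions ++ pvSpecG i k rest := by
  induction rest with
  | nil =>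
    intro i regions k
    have hlen : (PySem.List.pyRange (i - k) i 1).length = k := by
      rw [PySem.List.length_pyRange_one]; omega
    simp only [pvGoA, pvSpecG, hlen]
    by_cases h5 : k ≥ 5
    · have hne : PySem.List.pyRange (i - k) i 1 ≠ [] := by
        rw [PySem.List.pyRange_one_cons (by omega)]; simp
      rw [if_pos ⟨hne, h5⟩, if_pos h5]
    · rw [if_neg (fun h => h5 h.2), if_neg h5]; simp
  | cons b rest ih =>
    intro i regions k
    cases b with
    | true =>
      have happ : PySem.List.pyRange (i - (k : Int)) i 1 ++ [i] =
          PySem.List.pyRange (i + 1 - ((k + 1 : Nat) : Int)) (i + 1) 1 := by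
        push_cast
        rw [show i + 1 - ((k : Int) + 1) = i - k by ring,
          PySem.List.pyRange_one_succ_right (show i - (k : Int) ≤ i by omega)]
      simp only [pvGoA, if_true]
      rw [happ, ih (i + 1) regions (k + 1)]
      simp [pvSpecG]
    | false =>
      by_cases hk : k = 0
      · subst hk
        have hnil : PySem.List.pyRange (i - ((0 : Nat) : Int)) i 1 = [] :=
          PySem.List.pyRange_one_eq_nil (by simp)
        have hrec := ih (i + 1) regions 0
        simp only [Nat.cast_zero, sub_zero, PySem.List.pyRange_one_eq_nil le_rfl] at hrec
        rw [hnil]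
        calc pvGoA i regions [] (false :: rest)
            = pvGoA (i + 1) regions [] rest := by simp [pvGoA]
          _ = regions ++ pvSpecG (i + 1) 0 rest := hrec
          _ = regions ++ pvSpecG i 0 (false :: rest) := by norm_num [pvSpecG]
      · have hne : PySem.List.pyRange (i - (k : Int)) i 1 ≠ [] := by
          rw [PySem.List.pyRange_one_cons (by omega)]; simp
        have hlen : (PySem.List.pyRange (i - (k : Int)) i 1).length = k := by
          rw [PySem.List.length_pyRange_one]; omega
        have hrec := ih (i + 1)
          (if k ≥ 5 then regions ++ [PySem.List.pyRange (i - (k : Int)) i 1] else regions) 0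
        simp only [Nat.cast_zero, sub_zero, PySem.List.pyRange_one_eq_nil le_rfl] at hrec
        simp only [pvGoA, Bool.false_eq_true, if_false, if_pos hne, hlen, hrec, pvSpecG]
        split_ifs <;> simp

-- ===== VERDICT (by name: the statement is the Claim_ definition above) =====
theorem group_stable_points_py_spec : Claim_equal_group_stable_points_py := by
  intro sp _
  show _ = _
  have hA : group_stable_points_py sp = pvSpecG 0 0 sp := by
    have h := pvGoA_eq sp 0 [] 0
    simp only [Nat.cast_zero, sub_zero, PySem.List.pyRange_one_eq_nil le_rfl] at h
    simpa [group_stable_points_py] using h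
  have hB : group_stable_points_py_alt sp = pvSpecG 0 0 sp := by
    rw [pvEmit_zero, ← pvEmit_eq_specG sp 0 0]
    simp [pvPend]
  rw [hA, hB]
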